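-- pv_equiv track=rewrite | github.com/ScriptingBeyondCS/matplotlib-life | wk9lab/hw9pr1_graphics.py | copy
-- ===== SOURCE A (Python) =====
-- def createOneRow(width):
--     """ returns one row of zeros of width "width"...
--          You might use this in your createBoard(width, height) function """
--     row = []
--     for col in range(width):
--         row += [0]
--     return row
--
-- def createBoard(width, height):
--     """ returns a 2d array with "height" rows and "width" cols """
--     A = []
--     for row in range(height):
--         A += [createOneRow(width)]
--     return A
--
-- def copy(A):
--     """ creates "deep" copy of 2d array A
--     """
--     height = len(A)
--     width = len(A[0])
--     newA = createBoard( width, height )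
--     for row in range(1, height-1):
--         for col in range(1, width-1):
--             newA[row][col] = A[row][col]
--     return newA
-- ===== SOURCE B (Python) =====
-- def copy(A):
--     """ creates "deep" copy of 2d array A """
--     height = len(A)
--     width = len(A[0])
--     return [[A[r][c] if 0 < r < height - 1 and 0 < c < width - 1 else 0
--              for c in range(width)]
--             for r in range(height)]
-- ===== Notes on version B (the rewrite author's own statement) =====
-- stated objective: simpler
-- what changed: B builds the result directly as one nested comprehension computing each cell (interior value or 0), instead of allocating a zero board with helper functions and overwriting the interior in place.
import Mathlib
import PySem

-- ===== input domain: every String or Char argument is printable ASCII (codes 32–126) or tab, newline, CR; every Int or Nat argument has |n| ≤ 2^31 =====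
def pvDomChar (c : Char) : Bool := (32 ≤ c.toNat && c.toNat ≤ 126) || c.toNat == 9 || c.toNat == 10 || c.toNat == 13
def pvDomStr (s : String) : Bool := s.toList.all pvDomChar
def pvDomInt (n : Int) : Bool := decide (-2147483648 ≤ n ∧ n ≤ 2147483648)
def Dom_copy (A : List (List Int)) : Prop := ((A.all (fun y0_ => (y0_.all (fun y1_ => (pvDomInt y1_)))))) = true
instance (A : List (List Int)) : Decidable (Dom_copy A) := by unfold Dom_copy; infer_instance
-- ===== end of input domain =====

-- B is simpler: one nested comprehension computing each cell directly, instead of allocating a zero board and overwriting the interior.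

-- ===== PORT A =====
def createOneRowL (width : Int) : List Int :=
  (PySem.List.pyRange 0 width 1).foldl (fun row _ => row ++ [0]) []

def createBoardL (width height : Int) : List (List Int) :=
  (PySem.List.pyRange 0 height 1).foldl (fun acc _ => acc ++ [createOneRowL width]) []

def copy (A : List (List Int)) : List (List Int) :=
  let height : Int := A.length
  let width : Int := (A.headD []).length   -- A[0]; Pre_copy excludes empty A where Python raises
  let newA := createBoardL width height
  (PySem.List.pyRange 1 (height - 1) 1).foldl (fun nA row =>
    (PySem.List.pyRange 1 (width - 1) 1).foldl (fun nA2 col =>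
      nA2.set row.natAbs ((nA2.getD row.natAbs []).set col.natAbs
        ((A.getD row.natAbs []).getD col.natAbs 0))) nA) newA

-- ===== PORT B =====
def copy_alt (A : List (List Int)) : List (List Int) :=
  let height : Int := A.length
  let width : Int := (A.headD []).length
  (PySem.List.pyRange 0 height 1).map (fun r =>
    (PySem.List.pyRange 0 width 1).map (fun c =>
      if 0 < r ∧ r < height - 1 ∧ 0 < c ∧ c < width - 1 then
        (A.getD r.natAbs []).getD c.natAbs 0
      else 0))

-- ===== PRECONDITION & SPEC =====
-- Pre_copy excludes exactly the inputs where Python A raises IndexError: the empty list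
-- (len(A[0])) and ragged inputs whose interior rows are shorter than width-1 while width ≥ 3.
def Pre_copy (A : List (List Int)) : Prop :=
  A ≠ [] ∧ ((A.headD []).length ≥ 3 →
    ∀ r ∈ PySem.List.pyRange 1 ((A.length : Int) - 1) 1,
      (A.getD r.natAbs []).length + 1 ≥ (A.headD []).length)
instance (A : List (List Int)) : Decidable (Pre_copy A) := by unfold Pre_copy; infer_instance

def pvWitness_copy : List (List Int) := [[1, 2, 3], [4, 5, 6], [7, 8, 9]]

def Spec_copy (A : List (List Int)) (out : List (List Int)) : Prop := out = copy_alt A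
instance (A : List (List Int)) (out : List (List Int)) : Decidable (Spec_copy A out) := by unfold Spec_copy; infer_instance

-- ===== CLAIM (what is proved, stated in full; the proofs are below) =====
def Claim_equal_copy : Prop := ∀ (A : List (List Int)), Dom_copy A → Pre_copy A → Spec_copy A (copy A)

-- ===== LEMMAS AND PROOFS =====

-- appending [x] in a fold over any list builds a replicate
theorem foldl_append_singleton {α β : Type} (x : α) (l : List β) (init : List α) :
    l.foldl (fun acc _ => acc ++ [x]) init = init ++ List.replicate l.length x := by
  induction l generalizing init with
  | nil => simp
  | cons a t ih =>
    rw [List.foldl_cons, ih]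
    simp [List.replicate_succ, List.append_assoc]

theorem createOneRowL_eq (w : Int) : createOneRowL w = List.replicate w.toNat 0 := by
  unfold createOneRowL
  rw [foldl_append_singleton]
  simp [PySem.List.length_pyRange_one]

theorem createBoardL_eq (w h : Int) :
    createBoardL w h = List.replicate h.toNat (List.replicate w.toNat 0) := by
  unfold createBoardL
  rw [foldl_append_singleton]
  simp [PySem.List.length_pyRange_one, createOneRowL_eq]

-- a fold of sets whose written value depends only on the index
theorem foldl_set_get? {α : Type} (g : Nat → α) (l : List Int) (init : List α) (i : Nat) :
    (l.foldl (fun row c => row.set c.natAbs (g c.natAbs)) init)[i]? =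
      if i ∈ l.map Int.natAbs ∧ i < init.length then some (g i) else init[i]? := by
  induction l generalizing init with
  | nil => simp
  | cons a t ih =>
    rw [List.foldl_cons, ih]
    simp only [List.length_set, List.map_cons, List.mem_cons]
    by_cases hlt : i < init.length
    · by_cases ht : i ∈ t.map Int.natAbs
      · rw [if_pos ⟨ht, hlt⟩, if_pos ⟨Or.inr ht, hlt⟩]
      · rw [if_neg (by tauto), List.getElem?_set]
        by_cases he : a.natAbs = i
        · rw [if_pos he, if_pos (by omega), if_pos ⟨Or.inl he.symm, hlt⟩, he]
        · rw [if_neg he, if_neg (by tauto)]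
    · rw [if_neg (fun h => hlt h.2), if_neg (fun h => hlt h.2), List.getElem?_set]
      by_cases he : a.natAbs = i
      · rw [if_pos he, if_neg (by omega), List.getElem?_eq_none (by omega)]
      · rw [if_neg he]

-- a fold of sets at pairwise-distinct indices, each rewriting its own row from the current state
theorem foldl_setF_get? (F : Nat → List Int → List Int) (l : List Int)
    (hl : (l.map Int.natAbs).Nodup) (init : List (List Int)) (i : Nat) :
    (l.foldl (fun m r => m.set r.natAbs (F r.natAbs (m.getD r.natAbs []))) init)[i]? =
      if i ∈ l.map Int.natAbs ∧ i < init.length then some (F i (init.getD i [])) else init[i]? := by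
  induction l generalizing init with
  | nil => simp
  | cons a t ih =>
    rw [List.map_cons, List.nodup_cons] at hl
    rw [List.foldl_cons, ih hl.2]
    simp only [List.length_set, List.map_cons, List.mem_cons]
    by_cases hlt : i < init.length
    · by_cases ht : i ∈ t.map Int.natAbs
      · have hne : a.natAbs ≠ i := fun h => hl.1 (h ▸ ht)
        rw [if_pos ⟨ht, hlt⟩, if_pos ⟨Or.inr ht, hlt⟩]
        simp [List.getD_eq_getElem?_getD, List.getElem?_set_ne hne]
      · rw [if_neg (by tauto), List.getElem?_set]
        by_cases he : a.natAbs = i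
        · rw [if_pos he, if_pos (by omega), if_pos ⟨Or.inl he.symm, hlt⟩, he]
        · rw [if_neg he, if_neg (by tauto)]
    · rw [if_neg (fun h => hlt h.2), if_neg (fun h => hlt h.2), List.getElem?_set]
      by_cases he : a.natAbs = i
      · rw [if_pos he, if_neg (by omega), List.getElem?_eq_none (by omega)]
      · rw [if_neg he]

-- set-to-own-value is the identity
theorem set_getD_self (m : List (List Int)) (r : Nat) : m.set r (m.getD r []) = m := by
  by_cases hr : r < m.length
  · apply List.ext_getElem (by simp)
    intro i h1 h2
    rw [List.getElem_set]
    split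
    · next h =>
      subst h
      rw [List.getD_eq_getElem?_getD, List.getElem?_eq_getElem hr]
      rfl
    · rfl
  · exact List.set_eq_of_length_le (by omega)

theorem getD_set_self (m : List (List Int)) (r : Nat) (x : List Int) (hr : r < m.length) :
    (m.set r x).getD r [] = x := by
  simp [List.getD_eq_getElem?_getD, hr]

-- the inner column loop of A rewrites a single row of the matrix
theorem inner_fold_eq (cols : List Int) (r : Nat) (v : Nat → Int) (m : List (List Int)) :
    cols.foldl (fun nA2 col =>
        nA2.set r ((nA2.getD r []).set col.natAbs (v col.natAbs))) m =
      m.set r (cols.foldl (fun row c => row.set c.natAbs (v c.natAbs)) (m.getD r [])) := by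
  induction cols generalizing m with
  | nil => exact (set_getD_self m r).symm
  | cons c t ih =>
    by_cases hr : r < m.length
    · rw [List.foldl_cons, ih, List.foldl_cons]
      rw [getD_set_self m r _ hr, List.set_set]
    · have hm : ∀ x, m.set r x = m := fun x => List.set_eq_of_length_le (by omega)
      simp only [List.foldl_cons, ih, hm]

theorem mem_natAbs_pyRange_one {a b : Int} (ha : 0 ≤ a) (i : Nat) :
    i ∈ (PySem.List.pyRange a b 1).map Int.natAbs ↔ a ≤ (i : Int) ∧ (i : Int) < b := by
  simp only [List.mem_map]
  constructor
  · rintro ⟨x, hx, rfl⟩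
    rw [PySem.List.mem_pyRange_one] at hx
    omega
  · intro h
    exact ⟨(i : Int), by rw [PySem.List.mem_pyRange_one]; omega, by simp⟩

theorem nodup_natAbs_pyRange_one {a b : Int} (ha : 0 ≤ a) :
    ((PySem.List.pyRange a b 1).map Int.natAbs).Nodup := by
  refine (PySem.List.nodup_pyRange_one (a := a) (b := b)).map_on ?_
  intro x hx y hy hxy
  rw [PySem.List.mem_pyRange_one] at hx hy
  omega

-- the row produced by the inner loop, element by element
theorem row_get? (w : Int) (v : Nat → Int) (c : Nat) (hc : c < w.toNat) :
    ((PySem.List.pyRange 1 (w - 1) 1).foldl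
        (fun row x => row.set x.natAbs (v x.natAbs)) (List.replicate w.toNat 0))[c]? =
      some (if 0 < (c : Int) ∧ (c : Int) < w - 1 then v c else 0) := by
  rw [foldl_set_get? v]
  simp only [mem_natAbs_pyRange_one (by norm_num : (0:Int) ≤ 1), List.length_replicate,
    List.getElem?_replicate]
  by_cases h : 0 < (c : Int) ∧ (c : Int) < w - 1
  · rw [if_pos ⟨⟨by omega, by omega⟩, hc⟩, if_pos h]
  · rw [if_neg (by omega), if_pos hc, if_neg h]

theorem foldl_set_length {α : Type} (f : Int → α) (l : List Int) (init : List α) :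
    (l.foldl (fun row c => row.set c.natAbs (f c)) init).length = init.length := by
  induction l generalizing init with
  | nil => rfl
  | cons a t ih => rw [List.foldl_cons, ih, List.length_set]

-- ===== VERDICT (by name: the statement is the Claim_ definition above) =====
theorem copy_spec : Claim_equal_copy := by
  intro A _ _
  unfold Spec_copy copy copy_alt
  simp only []
  set h : Int := (A.length : Int) with hh
  set w : Int := ((A.headD []).length : Int) with hw
  rw [createBoardL_eq]
  have step : ∀ (nA : List (List Int)) (row : Int),
      (PySem.List.pyRange 1 (w - 1) 1).foldl (fun nA2 col =>
        nA2.set row.natAbs ((nA2.getD row.natAbs []).set col.natAbs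
          ((A.getD row.natAbs []).getD col.natAbs 0))) nA =
      nA.set row.natAbs ((PySem.List.pyRange 1 (w - 1) 1).foldl
        (fun r c => r.set c.natAbs ((A.getD row.natAbs []).getD c.natAbs 0))
        (nA.getD row.natAbs [])) := by
    intro nA row
    exact inner_fold_eq _ row.natAbs (fun c => (A.getD row.natAbs []).getD c 0) nA
  rw [PySem.List.foldl_congr_mem _ _
      (fun nA row => nA.set row.natAbs ((PySem.List.pyRange 1 (w - 1) 1).foldl
        (fun r c => r.set c.natAbs ((A.getD row.natAbs []).getD c.natAbs 0))
        (nA.getD row.natAbs []))) _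
      (fun nA row _ => step nA row)]
  apply List.ext_getElem?
  intro i
  rw [foldl_setF_get? (fun r cur => (PySem.List.pyRange 1 (w - 1) 1).foldl
        (fun row c => row.set c.natAbs ((A.getD r []).getD c.natAbs 0)) cur)
      _ (nodup_natAbs_pyRange_one (by omega))]
  simp only [mem_natAbs_pyRange_one (by norm_num : (0:Int) ≤ 1), List.length_replicate]
  by_cases hi : i < A.length
  · have hmapi : ((PySem.List.pyRange 0 h 1).map (fun r =>
        (PySem.List.pyRange 0 w 1).map (fun c =>
          if 0 < r ∧ r < h - 1 ∧ 0 < c ∧ c < w - 1 then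
            (A.getD r.natAbs []).getD c.natAbs 0 else 0)))[i]? =
        some ((PySem.List.pyRange 0 w 1).map (fun c =>
          if 0 < (i : Int) ∧ (i : Int) < h - 1 ∧ 0 < c ∧ c < w - 1 then
            (A.getD (i : Int).natAbs []).getD c.natAbs 0 else 0)) := by
      rw [List.getElem?_map, PySem.List.getElem?_pyRange_one,
        if_pos (show i < (h - 0).toNat by omega)]
      simp
    rw [hmapi]
    by_cases hin : (1 : Int) ≤ (i : Int) ∧ (i : Int) < h - 1
    · rw [if_pos ⟨hin, show i < h.toNat by omega⟩]
      congr 1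
      rw [List.getD_eq_getElem?_getD (l := List.replicate h.toNat (List.replicate w.toNat 0)),
        List.getElem?_replicate, if_pos (show i < h.toNat by omega), Option.getD_some]
      apply List.ext_getElem?
      intro c
      by_cases hc : c < w.toNat
      · rw [row_get? w (fun n => (A.getD i []).getD n 0) c hc,
          List.getElem?_map, PySem.List.getElem?_pyRange_one,
          if_pos (show c < (w - 0).toNat by omega)]
        simp only [Option.map_some, Option.some.injEq, zero_add, Int.natAbs_natCast]
        by_cases hcc : 0 < (c : Int) ∧ (c : Int) < w - 1
        · rw [if_pos hcc, if_pos ⟨by omega, by omega, hcc⟩]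
        · rw [if_neg hcc, if_neg (by tauto)]
      · rw [List.getElem?_eq_none (show _ by
            rw [foldl_set_length (fun x => (A.getD i []).getD x.natAbs 0)]
            simp only [List.length_replicate]
            omega),
          List.getElem?_eq_none (by simp [PySem.List.length_pyRange_one]; omega)]
    · rw [if_neg (by omega), List.getElem?_replicate, if_pos (show i < h.toNat by omega)]
      congr 1
      apply List.ext_getElem?
      intro c
      rw [List.getElem?_map, PySem.List.getElem?_pyRange_one, List.getElem?_replicate]
      by_cases hc : c < w.toNat
      · rw [if_pos (show c < (w - 0).toNat by omega), if_pos hc]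
        simp only [Option.map_some, Option.some.injEq, zero_add]
        rw [if_neg (by omega)]
        
      · rw [if_neg (show ¬c < (w - 0).toNat by omega), if_neg hc]
        simp
  · rw [if_neg (by omega)]
    rw [List.getElem?_replicate, if_neg (by omega)]
    rw [List.getElem?_eq_none (by simp [PySem.List.length_pyRange_one]; omega)]
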